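-- pv_equiv track=rewrite | github.com/Sabuti/GeradorCodigoIntermediario_Groupo5_LFC | src/trabalho.py | RESorMEM
-- ===== SOURCE A (Python) =====
-- def RESorMEM(token: str) -> bool:
--     if not token:
--         return False
--     estado = "Q0"
--     for ch in token:
--         if estado == "Q0":
--             if ch.isalpha() and ch.isupper():
--                 estado = "QID"
--             else:
--                 return False
--         elif estado == "QID":
--             if not (ch.isalpha() and ch.isupper()) and not ch.isdigit():
--                 return False
--     return estado == "QID"
-- ===== SOURCE B (Python) =====
-- _UPPER = frozenset("ABCDEFGHIJKLMNOPQRSTUVWXYZ")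
-- _ALNUM = _UPPER | frozenset("0123456789")
--
--
-- def RESorMEM(token: str) -> bool:
--     if not token:
--         return False
--     return token[0] in _UPPER and not (set(token) - _ALNUM)
-- ===== Notes on version B (the rewrite author's own statement) =====
-- stated objective: alternative
-- what changed: Replaced the Q0/QID character-by-character state machine by a set formulation: check the first character's membership in an uppercase-letter set, then build the token's character set once and test that its set difference with the allowed alphabet is empty.
import Mathlib
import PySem

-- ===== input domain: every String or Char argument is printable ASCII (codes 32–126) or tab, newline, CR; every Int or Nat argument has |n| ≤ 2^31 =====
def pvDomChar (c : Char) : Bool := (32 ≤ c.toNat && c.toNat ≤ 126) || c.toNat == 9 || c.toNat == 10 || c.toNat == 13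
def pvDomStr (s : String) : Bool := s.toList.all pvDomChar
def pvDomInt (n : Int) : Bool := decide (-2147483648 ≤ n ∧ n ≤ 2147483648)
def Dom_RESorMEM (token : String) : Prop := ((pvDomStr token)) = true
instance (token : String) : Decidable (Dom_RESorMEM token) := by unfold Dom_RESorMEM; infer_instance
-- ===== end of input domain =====

-- B replaces A's Q0/QID state-machine scan by a set formulation: first character's membership
-- in an uppercase-letter set, then the token's character set minus the allowed alphabet must
-- be empty (objective: alternative).

-- ===== PORT A =====
-- A's for-loop over the characters, carrying the state string `estado`.
def pvALoop : String → List Char → Bool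
  | estado, [] => estado == "QID"
  | estado, ch :: rest =>
    if estado == "Q0" then
      if PySem.Chars.isalpha ch && PySem.Chars.isupper ch then pvALoop "QID" rest
      else false
    else if estado == "QID" then
      if !(PySem.Chars.isalpha ch && PySem.Chars.isupper ch) && !(PySem.Chars.isdigit ch) then
        false
      else pvALoop estado rest
    else pvALoop estado rest

def RESorMEM (token : String) : Bool :=
  if token.toList = [] then false
  else pvALoop "Q0" token.toList

-- ===== PORT B =====
-- _UPPER = frozenset("ABCDEFGHIJKLMNOPQRSTUVWXYZ"); _ALNUM = _UPPER | frozenset("0123456789")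
def pvUPPER : PySem.Set Char := PySem.Set.ofList "ABCDEFGHIJKLMNOPQRSTUVWXYZ".toList
def pvALNUM : PySem.Set Char := PySem.Set.union pvUPPER "0123456789".toList

def RESorMEM_alt (token : String) : Bool :=
  match token.toList with
  | [] => false
  | h :: _ =>
    PySem.Set.contains pvUPPER h &&
      (PySem.Set.diff (PySem.Set.ofList token.toList) pvALNUM == ([] : List Char))

-- ===== PRECONDITION & SPEC =====
def Spec_RESorMEM (token : String) (out : Bool) : Prop := out = RESorMEM_alt token
instance (token : String) (out : Bool) : Decidable (Spec_RESorMEM token out) := by unfold Spec_RESorMEM; infer_instance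

-- ===== CLAIM (what is proved, stated in full; the proofs are below) =====
def Claim_equal_RESorMEM : Prop := ∀ (token : String), Dom_RESorMEM token → Spec_RESorMEM token (RESorMEM token)

-- ===== LEMMAS AND PROOFS =====

lemma pvCharEq (c d : Char) (h : c.toNat = d.toNat) : c = d := by
  have := congrArg Char.ofNat h
  rwa [Char.ofNat_toNat, Char.ofNat_toNat] at this

lemma pvMemMap (L : List Char) (c : Char) : c ∈ L ↔ c.toNat ∈ L.map Char.toNat := by
  constructor
  · exact fun h => List.mem_map_of_mem h
  · intro h
    obtain ⟨d, hd, he⟩ := List.mem_map.1 h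
    exact (pvCharEq d c he) ▸ hd

-- character-order facts used to translate Char comparisons to Nat arithmetic
lemma pvLe (a b : Char) : (a ≤ b) ↔ (a.toNat ≤ b.toNat) := Iff.rfl
lemma pvA : 'A'.toNat = 65 := rfl
lemma pvZ : 'Z'.toNat = 90 := rfl
lemma pva : 'a'.toNat = 97 := rfl
lemma pvz : 'z'.toNat = 122 := rfl
lemma pv0 : '0'.toNat = 48 := rfl
lemma pv9 : '9'.toNat = 57 := rfl

-- A's tail predicate, named for brevity in the lemmas
def pvOK (c : Char) : Bool :=
  (PySem.Chars.isalpha c && PySem.Chars.isupper c) || PySem.Chars.isdigit c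

-- membership in the literal uppercase set coincides with Python's isalpha∧isupper test
lemma mem_pvUPPER (c : Char) :
    PySem.Set.contains pvUPPER c = (PySem.Chars.isalpha c && PySem.Chars.isupper c) := by
  have hU : pvUPPER = "ABCDEFGHIJKLMNOPQRSTUVWXYZ".toList :=
    PySem.Set.ofList_eq_self_of_nodup _ (by decide)
  have hmap : "ABCDEFGHIJKLMNOPQRSTUVWXYZ".toList.map Char.toNat = List.range' 65 26 := by decide
  have hmem : c ∈ pvUPPER ↔ 65 ≤ c.toNat ∧ c.toNat < 91 := by
    rw [hU, pvMemMap, hmap, List.mem_range'_1]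
  have hup : (PySem.Chars.isalpha c && PySem.Chars.isupper c)
      = decide (65 ≤ c.toNat ∧ c.toNat < 91) := by
    rw [Bool.eq_iff_iff]
    simp only [PySem.Chars.isalpha, PySem.Chars.isupper, PySem.Chars.islower,
      Bool.and_eq_true, Bool.or_eq_true, decide_eq_true_eq, pvLe, pvA, pvZ, pva, pvz]
    omega
  rw [PySem.Set.contains, List.contains_eq_mem, hup, decide_eq_decide]
  exact hmem

-- membership in the allowed alphabet coincides with A's tail predicate
lemma mem_pvALNUM (c : Char) : decide (c ∈ pvALNUM) = pvOK c := by
  have hA : pvALNUM = "ABCDEFGHIJKLMNOPQRSTUVWXYZ0123456789".toList := by decide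
  have hmap : "ABCDEFGHIJKLMNOPQRSTUVWXYZ0123456789".toList.map Char.toNat
      = List.range' 65 26 ++ List.range' 48 10 := by decide
  have hmem : c ∈ pvALNUM ↔ (65 ≤ c.toNat ∧ c.toNat < 91) ∨ (48 ≤ c.toNat ∧ c.toNat < 58) := by
    rw [hA, pvMemMap, hmap]
    simp [List.mem_append, List.mem_range'_1]
  have hok : pvOK c
      = decide ((65 ≤ c.toNat ∧ c.toNat < 91) ∨ (48 ≤ c.toNat ∧ c.toNat < 58)) := by
    rw [Bool.eq_iff_iff]
    simp only [pvOK, PySem.Chars.isalpha, PySem.Chars.isupper, PySem.Chars.islower,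
      PySem.Chars.isdigit, Bool.and_eq_true, Bool.or_eq_true, decide_eq_true_eq,
      pvLe, pvA, pvZ, pva, pvz, pv0, pv9]
    omega
  rw [hok, decide_eq_decide]
  exact hmem

lemma pvALoop_QID (rest : List Char) : pvALoop "QID" rest = rest.all pvOK := by
  induction rest with
  | nil => rfl
  | cons c rest ih =>
    simp only [pvALoop, List.all_cons]
    by_cases h : pvOK c = true
    · simp only [pvOK] at h
      simp [h, ih, pvOK]
    · simp only [pvOK] at h
      simp [h, ih, pvOK]

-- the set difference on set(token) is empty iff every character satisfies A's tail predicate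
lemma diff_empty_iff (xs : List Char) :
    (PySem.Set.diff (PySem.Set.ofList xs) pvALNUM == ([] : List Char)) = xs.all pvOK := by
  have h1 : (PySem.Set.diff (PySem.Set.ofList xs) pvALNUM == ([] : List Char)) = true
      ↔ ∀ c ∈ xs, c ∈ pvALNUM := by
    rw [beq_iff_eq, PySem.Set.diff, List.filter_eq_nil_iff]
    constructor
    · intro h c hc
      have := h c ((PySem.Set.mem_ofList xs c).2 hc)
      simpa [PySem.Set.contains, List.contains_eq_mem] using this
    · intro h c hc
      have := h c ((PySem.Set.mem_ofList xs c).1 hc)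
      simp [PySem.Set.contains, List.contains_eq_mem, this]
  have h2 : xs.all pvOK = true ↔ ∀ c ∈ xs, c ∈ pvALNUM := by
    rw [List.all_eq_true]
    constructor
    · intro h c hc
      have := h c hc
      rw [← mem_pvALNUM] at this
      exact of_decide_eq_true this
    · intro h c hc
      rw [← mem_pvALNUM]
      exact decide_eq_true (h c hc)
  cases hb : xs.all pvOK
  · cases hx : (PySem.Set.diff (PySem.Set.ofList xs) pvALNUM == ([] : List Char))
    · rfl
    · exact absurd (h2.2 (h1.1 hx)) (by simp [hb])
  · exact h1.2 (h2.1 hb)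

-- ===== VERDICT (by name: the statement is the Claim_ definition above) =====
theorem RESorMEM_spec : Claim_equal_RESorMEM := by
  intro token _
  unfold Spec_RESorMEM RESorMEM RESorMEM_alt
  cases h : token.toList with
  | nil => simp
  | cons head rest =>
    simp only [reduceCtorEq, if_false]
    rw [mem_pvUPPER, diff_empty_iff]
    show pvALoop "Q0" (head :: rest) = _
    simp only [pvALoop]
    cases hh : (PySem.Chars.isalpha head && PySem.Chars.isupper head)
    · simp
    · simp only [if_true, List.all_cons]
      rw [pvALoop_QID]
      have hokh : pvOK head = true := by simp [pvOK, hh]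
      simp [hokh]
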